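-- pv_equiv track=rewrite | github.com/gustavo-detarso/mppg | disciplinas/politica_brasileira_contemporanea/paper_gen/gerar_paper_org_ai_interativo_v3_6_9.py | split_bib_entries
-- ===== SOURCE A (Python) =====
-- def split_bib_entries(text: str) -> list[str]:
--     """Divide um .bib em entradas individuais de maneira simples e robusta."""
--     entries: list[str] = []
--     i = 0
--     n = len(text)
--     while i < n:
--         at = text.find("@", i)
--         if at == -1:
--             break
--         brace = text.find("{", at)
--         if brace == -1:
--             break
--         depth = 0
--         j = brace
--         while j < n:
--             ch = text[j]
--             if ch == "{":
--                 depth += 1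
--             elif ch == "}":
--                 depth -= 1
--                 if depth == 0:
--                     entry = text[at:j+1].strip()
--                     if entry:
--                         entries.append(entry)
--                     i = j + 1
--                     break
--             j += 1
--         else:
--             entry = text[at:].strip()
--             if entry:
--                 entries.append(entry)
--             break
--     return entries
-- ===== SOURCE B (Python) =====
-- def split_bib_entries(text: str) -> list[str]:
--     """Divide um .bib em entradas individuais de maneira simples e robusta."""
--     entries: list[str] = []
--     OUTSIDE, SEEKING, IN_ENTRY = 0, 1, 2
--     state = OUTSIDE
--     buf: list[str] = []
--     depth = 0
--     for ch in text:
--         if state == OUTSIDE: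
--             if ch == "@":
--                 buf = [ch]
--                 state = SEEKING
--         elif state == SEEKING:
--             buf.append(ch)
--             if ch == "{":
--                 depth = 1
--                 state = IN_ENTRY
--         else:
--             buf.append(ch)
--             if ch == "{":
--                 depth += 1
--             elif ch == "}":
--                 depth -= 1
--                 if depth == 0:
--                     entry = "".join(buf).strip()
--                     if entry:
--                         entries.append(entry)
--                     state = OUTSIDE
--     if state == IN_ENTRY:
--         entry = "".join(buf).strip()
--         if entry:
--             entries.append(entry)
--     return entries
-- ===== Notes on version B (the rewrite author's own statement) =====
-- stated objective: alternative
-- what changed: Replaces A's find-and-jump outer loop with nested index scanning/slicing by a single character-by-character pass driven by an explicit OUTSIDE/SEEKING/IN_ENTRY state machine that accumulates each entry in a buffer instead of slicing the text.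
import Mathlib
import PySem

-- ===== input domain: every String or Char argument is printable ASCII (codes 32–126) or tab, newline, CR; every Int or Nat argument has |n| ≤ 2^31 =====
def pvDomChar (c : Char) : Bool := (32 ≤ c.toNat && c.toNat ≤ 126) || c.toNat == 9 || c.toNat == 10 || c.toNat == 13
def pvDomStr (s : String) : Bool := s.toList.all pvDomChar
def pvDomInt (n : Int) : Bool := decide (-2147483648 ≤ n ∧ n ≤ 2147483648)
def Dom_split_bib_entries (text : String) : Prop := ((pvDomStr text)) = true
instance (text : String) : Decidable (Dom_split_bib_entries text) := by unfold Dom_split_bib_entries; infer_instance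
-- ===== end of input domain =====

-- B replaces A's find-and-jump loop with a single character-by-character state-machine pass
-- that accumulates each entry in a buffer instead of slicing (objective: alternative; same O(n) cost).

-- ===== PORT A =====
-- inner `while j < n` loop of A: scans braces from j with the running depth; returns the updated
-- entries list and `some (j+1)` (the new outer i) on a balanced close, `none` when it runs off the end.
-- `fuel` is only a structural totality guard; it is always called with enough fuel to reach the exit.
def pvA_innerF (cs : List Char) (a : Nat) : Nat → Nat → Int → List (List Char) → List (List Char) × Option Nat
  | 0, _, _, es => (es, none)
  | fuel+1, j, depth, es =>
    if _h : j < cs.length then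
      if cs[j] = '{' then pvA_innerF cs a fuel (j+1) (depth+1) es
      else if cs[j] = '}' then
        if depth - 1 = 0 then
          -- entry = text[at:j+1].strip()
          ((if PySem.Chars.strip (PySem.List.slice cs (some (a:Int)) (some ((j:Int)+1))) ≠ [] then
              es ++ [PySem.Chars.strip (PySem.List.slice cs (some (a:Int)) (some ((j:Int)+1)))]
            else es), some (j+1))
        else pvA_innerF cs a fuel (j+1) (depth-1) es
      else pvA_innerF cs a fuel (j+1) depth es
    else
      -- `else` of the while: entry = text[at:].strip()
      ((if PySem.Chars.strip (PySem.List.slice cs (some (a:Int)) none) ≠ [] then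
          es ++ [PySem.Chars.strip (PySem.List.slice cs (some (a:Int)) none)]
        else es), none)

-- outer `while i < n` loop of A: find '@' from i, find '{' from there, run the inner scan
def pvA_outerF (cs : List Char) : Nat → Nat → List (List Char) → List (List Char)
  | 0, _, es => es
  | fuel+1, i, es =>
    if i < cs.length then
      if PySem.Chars.findFrom cs ['@'] (i:Int) = -1 then es
      else
        if PySem.Chars.findFrom cs ['{'] (((PySem.Chars.findFrom cs ['@'] (i:Int)).toNat : Nat) : Int) = -1 then es
        else
          match pvA_innerF cs (PySem.Chars.findFrom cs ['@'] (i:Int)).toNat (cs.length + 1)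
              (PySem.Chars.findFrom cs ['{'] (((PySem.Chars.findFrom cs ['@'] (i:Int)).toNat : Nat) : Int)).toNat 0 es with
          | (es', none) => es'
          | (es', some i') => pvA_outerF cs fuel i' es'
    else es

def split_bib_entries (text : String) : List String :=
  (pvA_outerF text.toList (text.toList.length + 1) 0 []).map String.ofList

-- ===== PORT B =====
-- one step of B's state machine; state 0 = OUTSIDE, 1 = SEEKING, 2 = IN_ENTRY
def pvB_step (st : Nat × List Char × Int × List (List Char)) (ch : Char) :
    Nat × List Char × Int × List (List Char) :=
  match st with
  | (0, buf, depth, es) => if ch = '@' then (1, [ch], depth, es) else (0, buf, depth, es)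
  | (1, buf, depth, es) => if ch = '{' then (2, buf ++ [ch], 1, es) else (1, buf ++ [ch], depth, es)
  | (_, buf, depth, es) =>
      if ch = '{' then (2, buf ++ [ch], depth + 1, es)
      else if ch = '}' then
        if depth - 1 = 0 then
          (0, buf ++ [ch],  depth - 1,
            if PySem.Chars.strip (buf ++ [ch]) ≠ [] then es ++ [PySem.Chars.strip (buf ++ [ch])] else es)
        else (2, buf ++ [ch], depth - 1, es)
      else (2, buf ++ [ch], depth, es)

-- after the loop: `if state == IN_ENTRY: …`
def pvB_fin (st : Nat × List Char × Int × List (List Char)) : List (List Char) :=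
  match st with
  | (2, buf, _, es) => if PySem.Chars.strip buf ≠ [] then es ++ [PySem.Chars.strip buf] else es
  | (_, _, _, es) => es

def split_bib_entries_alt (text : String) : List String :=
  (pvB_fin (text.toList.foldl pvB_step (0, [], 0, []))).map String.ofList

-- ===== PRECONDITION & SPEC =====
def Spec_split_bib_entries (text : String) (out : List String) : Prop := out = split_bib_entries_alt text
instance (text : String) (out : List String) : Decidable (Spec_split_bib_entries text out) := by unfold Spec_split_bib_entries; infer_instance

-- ===== CLAIM (what is proved, stated in full; the proofs are below) =====
def Claim_equal_split_bib_entries : Prop := ∀ (text : String), Dom_split_bib_entries text → Spec_split_bib_entries text (split_bib_entries text)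

-- ===== LEMMAS AND PROOFS =====

-- fuel-saturated views of the two loops: with enough fuel the fuel value is irrelevant,
-- so the loops can be reasoned about position by position
def pvAI (cs : List Char) (a j : Nat) (depth : Int) (es : List (List Char)) :
    List (List Char) × Option Nat :=
  pvA_innerF cs a (cs.length - j + 1) j depth es

def pvAO (cs : List Char) (i : Nat) (es : List (List Char)) : List (List Char) :=
  pvA_outerF cs (cs.length + 1 - i) i es

lemma pv_innerF_irrel (cs : List Char) (a : Nat) :
    ∀ (f1 f2 j : Nat) (depth : Int) (es : List (List Char)),
      cs.length - j < f1 → cs.length - j < f2 →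
      pvA_innerF cs a f1 j depth es = pvA_innerF cs a f2 j depth es := by
  intro f1
  induction f1 with
  | zero => intro f2 j depth es h1 h2; omega
  | succ f1 ih =>
      intro f2 j depth es h1 h2
      match f2, h2 with
      | f2+1, h2 =>
        simp only [pvA_innerF]
        by_cases hl : j < cs.length
        · rw [dif_pos hl, dif_pos hl]
          by_cases hc1 : cs[j] = '{'
          · rw [if_pos hc1, if_pos hc1]; exact ih f2 (j+1) (depth+1) es (by omega) (by omega)
          · rw [if_neg hc1, if_neg hc1]
            by_cases hc2 : cs[j] = '}'
            · rw [if_pos hc2, if_pos hc2]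
              by_cases hd : depth - 1 = 0
              · rw [if_pos hd, if_pos hd]
              · rw [if_neg hd, if_neg hd]; exact ih f2 (j+1) (depth-1) es (by omega) (by omega)
            · rw [if_neg hc2, if_neg hc2]; exact ih f2 (j+1) depth es (by omega) (by omega)
        · rw [dif_neg hl, dif_neg hl]

lemma pv_inner_someF (cs : List Char) (a : Nat) :
    ∀ (fuel j : Nat) (depth : Int) (es es' : List (List Char)) (i' : Nat),
      pvA_innerF cs a fuel j depth es = (es', some i') → j < i' := by
  intro fuel
  induction fuel with
  | zero => intro j depth es es' i' h; simp [pvA_innerF] at h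
  | succ fuel ih =>
      intro j depth es es' i' h
      simp only [pvA_innerF] at h
      by_cases hl : j < cs.length
      · rw [dif_pos hl] at h
        by_cases hc1 : cs[j] = '{'
        · rw [if_pos hc1] at h; exact Nat.lt_of_succ_lt (ih _ _ _ _ _ h)
        · rw [if_neg hc1] at h
          by_cases hc2 : cs[j] = '}'
          · rw [if_pos hc2] at h
            by_cases hd : depth - 1 = 0
            · rw [if_pos hd] at h; simp at h; omega
            · rw [if_neg hd] at h; exact Nat.lt_of_succ_lt (ih _ _ _ _ _ h)
          · rw [if_neg hc2] at h; exact Nat.lt_of_succ_lt (ih _ _ _ _ _ h)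
      · rw [dif_neg hl] at h; simp at h

-- the position returned by the inner loop is strictly beyond the outer position i
lemma pv_jump (cs : List Char) (i : Nat) (hi : i < cs.length)
    (hat : PySem.Chars.findFrom cs ['@'] (i:Int) ≠ -1)
    (hbr : PySem.Chars.findFrom cs ['{'] (((PySem.Chars.findFrom cs ['@'] (i:Int)).toNat : Nat) : Int) ≠ -1) :
    i ≤ (PySem.Chars.findFrom cs ['{'] (((PySem.Chars.findFrom cs ['@'] (i:Int)).toNat : Nat) : Int)).toNat := by
  have hs1 := PySem.Chars.findFrom_natCast_spec cs ['@'] i (le_of_lt hi) hat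
  have ha1 : (i : Int) ≤ PySem.Chars.findFrom cs ['@'] (i:Int) := hs1.1
  have ha2 : ['@'] <+: cs.drop (PySem.Chars.findFrom cs ['@'] (i:Int)).toNat := hs1.2.1
  have halen : (PySem.Chars.findFrom cs ['@'] (i:Int)).toNat < cs.length := by
    have := ha2.length_le; simp at this; omega
  have hs2 := PySem.Chars.findFrom_natCast_spec cs ['{']
    (PySem.Chars.findFrom cs ['@'] (i:Int)).toNat (le_of_lt halen) hbr
  have hb1 := hs2.1
  omega

lemma pv_outerF_irrel (cs : List Char) :
    ∀ (f1 f2 i : Nat) (es : List (List Char)),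
      cs.length + 1 - i ≤ f1 → cs.length + 1 - i ≤ f2 →
      pvA_outerF cs f1 i es = pvA_outerF cs f2 i es := by
  intro f1
  induction f1 with
  | zero =>
      intro f2 i es h1 h2
      match f2 with
      | 0 => rfl
      | f2+1 =>
        simp only [pvA_outerF]
        rw [if_neg (show ¬ i < cs.length by omega)]
  | succ f1 ih =>
      intro f2 i es h1 h2
      match f2 with
      | 0 =>
        simp only [pvA_outerF]
        rw [if_neg (show ¬ i < cs.length by omega)]
      | f2+1 =>
        simp only [pvA_outerF]
        by_cases hi : i < cs.length
        · rw [if_pos hi, if_pos hi]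
          by_cases hat : PySem.Chars.findFrom cs ['@'] (i:Int) = -1
          · rw [if_pos hat, if_pos hat]
          · rw [if_neg hat, if_neg hat]
            by_cases hbr : PySem.Chars.findFrom cs ['{'] (((PySem.Chars.findFrom cs ['@'] (i:Int)).toNat : Nat) : Int) = -1
            · rw [if_pos hbr, if_pos hbr]
            · rw [if_neg hbr, if_neg hbr]
              rcases he : pvA_innerF cs (PySem.Chars.findFrom cs ['@'] (i:Int)).toNat (cs.length + 1)
                  (PySem.Chars.findFrom cs ['{'] (((PySem.Chars.findFrom cs ['@'] (i:Int)).toNat : Nat) : Int)).toNat 0 es with ⟨es2, oi⟩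
              cases oi with
              | none => rfl
              | some i' =>
                  have hlt : i < i' :=
                    Nat.lt_of_le_of_lt (pv_jump cs i hi hat hbr) (pv_inner_someF cs _ _ _ _ _ _ _ he)
                  exact ih f2 i' es2 (by omega) (by omega)
        · rw [if_neg hi, if_neg hi]

-- one-step unfolding of the saturated inner loop
lemma pvAI_eq (cs : List Char) (a j : Nat) (depth : Int) (es : List (List Char)) :
    pvAI cs a j depth es =
      if _h : j < cs.length then
        if cs[j] = '{' then pvAI cs a (j+1) (depth+1) es
        else if cs[j] = '}' then
          if depth - 1 = 0 then
            ((if PySem.Chars.strip (PySem.List.slice cs (some (a:Int)) (some ((j:Int)+1))) ≠ [] then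
                es ++ [PySem.Chars.strip (PySem.List.slice cs (some (a:Int)) (some ((j:Int)+1)))]
              else es), some (j+1))
          else pvAI cs a (j+1) (depth-1) es
        else pvAI cs a (j+1) depth es
      else
        ((if PySem.Chars.strip (PySem.List.slice cs (some (a:Int)) none) ≠ [] then
            es ++ [PySem.Chars.strip (PySem.List.slice cs (some (a:Int)) none)]
          else es), none) := by
  conv_lhs => rw [pvAI]
  conv_lhs => rw [show cs.length - j + 1 = (cs.length - j) + 1 from rfl]
  conv_lhs => rw [pvA_innerF]
  by_cases hl : j < cs.length
  · rw [dif_pos hl, dif_pos hl]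
    have hir : ∀ (d : Int) (e : List (List Char)),
        pvA_innerF cs a (cs.length - j) (j+1) d e = pvAI cs a (j+1) d e := by
      intro d e
      rw [pvAI]
      exact pv_innerF_irrel cs a _ _ _ _ _ (by omega) (by omega)
    rw [hir, hir, hir]
  · rw [dif_neg hl, dif_neg hl]

-- one-step unfolding of the saturated outer loop
lemma pvAO_eq (cs : List Char) (i : Nat) (es : List (List Char)) :
    pvAO cs i es =
      if i < cs.length then
        if PySem.Chars.findFrom cs ['@'] (i:Int) = -1 then es
        else
          if PySem.Chars.findFrom cs ['{'] (((PySem.Chars.findFrom cs ['@'] (i:Int)).toNat : Nat) : Int) = -1 then es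
          else
            match pvAI cs (PySem.Chars.findFrom cs ['@'] (i:Int)).toNat
                (PySem.Chars.findFrom cs ['{'] (((PySem.Chars.findFrom cs ['@'] (i:Int)).toNat : Nat) : Int)).toNat 0 es with
            | (es', none) => es'
            | (es', some i') => pvAO cs i' es'
      else es := by
  conv_lhs => rw [pvAO]
  by_cases hi : i < cs.length
  · rw [show cs.length + 1 - i = (cs.length - i) + 1 by omega]
    conv_lhs => rw [pvA_outerF]
    rw [if_pos hi, if_pos hi]
    by_cases hat : PySem.Chars.findFrom cs ['@'] (i:Int) = -1
    · rw [if_pos hat, if_pos hat]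
    · rw [if_neg hat, if_neg hat]
      by_cases hbr : PySem.Chars.findFrom cs ['{'] (((PySem.Chars.findFrom cs ['@'] (i:Int)).toNat : Nat) : Int) = -1
      · rw [if_pos hbr, if_pos hbr]
      · rw [if_neg hbr, if_neg hbr]
        have hinner : pvA_innerF cs (PySem.Chars.findFrom cs ['@'] (i:Int)).toNat (cs.length + 1)
            (PySem.Chars.findFrom cs ['{'] (((PySem.Chars.findFrom cs ['@'] (i:Int)).toNat : Nat) : Int)).toNat 0 es
            = pvAI cs (PySem.Chars.findFrom cs ['@'] (i:Int)).toNat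
                (PySem.Chars.findFrom cs ['{'] (((PySem.Chars.findFrom cs ['@'] (i:Int)).toNat : Nat) : Int)).toNat 0 es := by
          rw [pvAI]
          exact pv_innerF_irrel cs _ _ _ _ _ _ (by omega) (by omega)
        rw [hinner]
        rcases he : pvAI cs (PySem.Chars.findFrom cs ['@'] (i:Int)).toNat
            (PySem.Chars.findFrom cs ['{'] (((PySem.Chars.findFrom cs ['@'] (i:Int)).toNat : Nat) : Int)).toNat 0 es with ⟨es2, oi⟩
        cases oi with
        | none => rfl
        | some i' =>
            have hlt : i < i' := by
              have he' : pvA_innerF cs (PySem.Chars.findFrom cs ['@'] (i:Int)).toNat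
                  (cs.length - (PySem.Chars.findFrom cs ['{'] (((PySem.Chars.findFrom cs ['@'] (i:Int)).toNat : Nat) : Int)).toNat + 1)
                  (PySem.Chars.findFrom cs ['{'] (((PySem.Chars.findFrom cs ['@'] (i:Int)).toNat : Nat) : Int)).toNat 0 es = (es2, some i') := by
                rw [← pvAI]; exact he
              exact Nat.lt_of_le_of_lt (pv_jump cs i hi hat hbr) (pv_inner_someF cs _ _ _ _ _ _ _ he')
            unfold pvAO
            exact pv_outerF_irrel cs _ _ _ _ (by omega) (by omega)
  · rcases hf : cs.length + 1 - i with _ | f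
    · rw [if_neg hi]; rfl
    · conv_lhs => rw [pvA_outerF]
      rw [if_neg hi, if_neg hi]

-- the remainder of A's outer-loop body once the position `a` of the '@' is fixed
def pvA_afterAt (cs : List Char) (a : Nat) (es : List (List Char)) : List (List Char) :=
  if PySem.Chars.findFrom cs ['{'] (a : Int) = -1 then es
  else
    match pvAI cs a (PySem.Chars.findFrom cs ['{'] (a : Int)).toNat 0 es with
    | (es', none) => es'
    | (es', some i') => pvAO cs i' es'

-- the slice text[a:i] as a list (B's buffer contents)
def pvSeg (cs : List Char) (a i : Nat) : List Char := (cs.drop a).take (i - a)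

lemma pv_prefix_singleton (c : Char) (t : List Char) : [c] <+: t ↔ t[0]? = some c := by
  cases t <;> simp [List.cons_prefix_cons, eq_comm]

lemma pv_find_eq (cs sub : List Char) (m : Nat) (h1 : sub <+: cs.drop m)
    (h2 : ∀ i < m, ¬ sub <+: cs.drop i) : PySem.Chars.find cs sub = (m : Int) := by
  have hinf : sub <:+: cs := h1.isInfix.trans (List.drop_suffix m cs).isInfix
  have hnn : 0 ≤ PySem.Chars.find cs sub := (PySem.Chars.find_nonneg_iff cs sub).2 hinf
  obtain ⟨hp, hmin⟩ := PySem.Chars.find_spec hnn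
  have : (PySem.Chars.find cs sub).toNat = m := by
    rcases lt_trichotomy (PySem.Chars.find cs sub).toNat m with h|h|h
    · exact absurd hp (h2 _ h)
    · exact h
    · exact absurd h1 (hmin m h)
  omega

lemma pv_findFrom_hit (cs : List Char) (c : Char) (a i : Nat) (ha : a ≤ i) (hi : i < cs.length)
    (hc : cs[i]? = some c) (hmin : ∀ m, a ≤ m → m < i → cs[m]? ≠ some c) :
    PySem.Chars.findFrom cs [c] (a : Int) = (i : Int) := by
  rw [PySem.Chars.findFrom_natCast cs [c] a (by omega)]
  have hfind : PySem.Chars.find (cs.drop a) [c] = ((i - a : Nat) : Int) := by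
    apply pv_find_eq
    · rw [List.drop_drop, pv_prefix_singleton, List.getElem?_drop]
      rwa [show a + (i - a) + 0 = i by omega]
    · intro j hj
      rw [List.drop_drop, pv_prefix_singleton, List.getElem?_drop]
      rw [show a + j + 0 = a + j by omega]
      exact hmin (a + j) (by omega) (by omega)
  rw [hfind]
  have hne : ¬ (((i - a : Nat) : Int) = -1) := by omega
  simp only [hne, if_false]
  omega

lemma pv_findFrom_miss (cs : List Char) (c : Char) (a : Nat) (ha : a ≤ cs.length)
    (hmiss : ∀ m, a ≤ m → cs[m]? ≠ some c) :
    PySem.Chars.findFrom cs [c] (a : Int) = -1 := by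
  rw [PySem.Chars.findFrom_natCast cs [c] a ha]
  have : PySem.Chars.find (cs.drop a) [c] = -1 := by
    rw [PySem.Chars.find_eq_neg_one_iff]
    intro hinf
    have hm : c ∈ cs.drop a := hinf.subset (by simp)
    obtain ⟨k, hk⟩ := List.mem_iff_getElem?.1 hm
    rw [List.getElem?_drop] at hk
    exact hmiss (a + k) (by omega) hk
  simp [this]

lemma pv_seg_extend (cs : List Char) (a i : Nat) (ha : a ≤ i) (hi : i < cs.length) :
    pvSeg cs a i ++ [cs[i]] = pvSeg cs a (i+1) := by
  unfold pvSeg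
  have h1 : i + 1 - a = (i - a) + 1 := by omega
  have h2 : i - a < (cs.drop a).length := by simp; omega
  rw [h1, List.take_add_one, List.getElem?_eq_getElem h2]
  simp [List.getElem_drop]
  congr 1
  omega

lemma pv_seg_all (cs : List Char) (a : Nat) :
    pvSeg cs a cs.length = cs.drop a := by
  unfold pvSeg
  apply List.take_of_length_le
  simp

-- base case of the main induction: the scan position has reached the end of the text
lemma pv_atEnd (cs : List Char) :
    ( (∀ (a : Nat) (buf : List Char) (d : Int) (es : List (List Char)), a ≤ cs.length →
        (∀ m, a ≤ m → m < cs.length → cs[m]? ≠ some '@') →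
        pvB_fin ((cs.drop cs.length).foldl pvB_step (0, buf, d, es)) = pvAO cs a es)
    ∧ (∀ (a : Nat) (d : Int) (es : List (List Char)), a < cs.length → cs[a]? = some '@' →
        (∀ m, a ≤ m → m < cs.length → cs[m]? ≠ some '{') →
        pvB_fin ((cs.drop cs.length).foldl pvB_step (1, pvSeg cs a cs.length, d, es)) = pvA_afterAt cs a es)
    ∧ (∀ (a : Nat) (depth : Int) (es : List (List Char)), a ≤ cs.length → 1 ≤ depth →
        pvB_fin ((cs.drop cs.length).foldl pvB_step (2, pvSeg cs a cs.length, depth, es)) =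
          (match pvAI cs a cs.length depth es with
           | (es', none) => es'
           | (es', some i') => pvAO cs i' es')) ) := by
  refine ⟨?_, ?_, ?_⟩
  · intro a buf d es ha hm
    simp only [List.drop_length, List.foldl_nil, pvB_fin]
    rw [pvAO_eq]
    by_cases hlen : a < cs.length
    · have hmiss : PySem.Chars.findFrom cs ['@'] (a : Int) = -1 := by
        apply pv_findFrom_miss cs '@' a (by omega)
        intro m hma
        by_cases hml : m < cs.length
        · exact hm m hma hml
        · rw [List.getElem?_eq_none (by omega)]; simp
      rw [if_pos hlen, if_pos hmiss]
    · rw [if_neg hlen]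
  · intro a d es ha hat hm
    simp only [List.drop_length, List.foldl_nil, pvB_fin]
    rw [pvA_afterAt]
    have hmiss : PySem.Chars.findFrom cs ['{'] (a : Int) = -1 := by
      apply pv_findFrom_miss cs '{' a (by omega)
      intro m hma
      by_cases hml : m < cs.length
      · exact hm m hma hml
      · rw [List.getElem?_eq_none (by omega)]; simp
    rw [if_pos hmiss]
  · intro a depth es ha hd
    simp only [List.drop_length, List.foldl_nil]
    conv_rhs => rw [pvAI_eq, dif_neg (lt_irrefl cs.length)]
    simp only [pvB_fin, pv_seg_all, PySem.List.slice_from_natCast]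

-- the main simultaneous induction over the remaining suffix
lemma pv_main (cs : List Char) : ∀ (k i : Nat), i ≤ cs.length → cs.length - i ≤ k →
    ( (∀ (a : Nat) (buf : List Char) (d : Int) (es : List (List Char)), a ≤ i →
        (∀ m, a ≤ m → m < i → cs[m]? ≠ some '@') →
        pvB_fin ((cs.drop i).foldl pvB_step (0, buf, d, es)) = pvAO cs a es)
    ∧ (∀ (a : Nat) (d : Int) (es : List (List Char)), a < i → cs[a]? = some '@' →
        (∀ m, a ≤ m → m < i → cs[m]? ≠ some '{') →
        pvB_fin ((cs.drop i).foldl pvB_step (1, pvSeg cs a i, d, es)) = pvA_afterAt cs a es)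
    ∧ (∀ (a : Nat) (depth : Int) (es : List (List Char)), a ≤ i → 1 ≤ depth →
        pvB_fin ((cs.drop i).foldl pvB_step (2, pvSeg cs a i, depth, es)) =
          (match pvAI cs a i depth es with
           | (es', none) => es'
           | (es', some i') => pvAO cs i' es')) ) := by
  intro k
  induction k with
  | zero =>
      intro i hi hk
      have hieq : i = cs.length := by omega
      subst hieq
      exact pv_atEnd cs
  | succ k ih =>
      intro i hi hk
      by_cases hil : i < cs.length
      · have hdrop : cs.drop i = cs[i] :: cs.drop (i+1) := List.drop_eq_getElem_cons hil
        obtain ⟨ih0, ih1, ih2⟩ := ih (i+1) (by omega) (by omega)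
        refine ⟨?_, ?_, ?_⟩
        · -- state OUTSIDE
          intro a buf d es ha hm
          rw [hdrop, List.foldl_cons]
          by_cases hat : cs[i] = '@'
          · rw [show pvB_step (0, buf, d, es) cs[i] = (1, [cs[i]], d, es) by simp [pvB_step, hat]]
            rw [show [cs[i]] = pvSeg cs i (i+1) by
              unfold pvSeg
              rw [show i + 1 - i = 1 by omega, hdrop]
              rfl]
            rw [ih1 i d es (by omega) (by rw [List.getElem?_eq_getElem hil, hat])
              (by intro m h1 h2
                  have : m = i := by omega
                  subst this
                  rw [List.getElem?_eq_getElem hil, hat]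
                  simp)]
            rw [pvAO_eq, if_pos (show a < cs.length by omega)]
            have hhit : PySem.Chars.findFrom cs ['@'] (a : Int) = (i : Int) :=
              pv_findFrom_hit cs '@' a i ha hil (by rw [List.getElem?_eq_getElem hil, hat]) hm
            simp only [hhit]
            rw [if_neg (show ¬((i:Int) = -1) by omega)]
            simp only [Int.toNat_natCast]
            rw [pvA_afterAt]
          · rw [show pvB_step (0, buf, d, es) cs[i] = (0, buf, d, es) by simp [pvB_step, hat]]
            apply ih0 a buf d es (by omega)
            intro m h1 h2
            by_cases hmi : m < i
            · exact hm m h1 hmi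
            · have : m = i := by omega
              subst this
              rw [List.getElem?_eq_getElem hil]
              simp [hat]
        · -- state SEEKING
          intro a d es ha hat hm
          rw [hdrop, List.foldl_cons]
          by_cases hbr : cs[i] = '{'
          · rw [show pvB_step (1, pvSeg cs a i, d, es) cs[i] = (2, pvSeg cs a i ++ [cs[i]], 1, es) by
              simp [pvB_step, hbr]]
            rw [pv_seg_extend cs a i (by omega) hil]
            rw [ih2 a 1 es (by omega) (by norm_num)]
            rw [pvA_afterAt]
            have hhit : PySem.Chars.findFrom cs ['{'] (a : Int) = (i : Int) :=
              pv_findFrom_hit cs '{' a i (by omega) hil (by rw [List.getElem?_eq_getElem hil, hbr]) hm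
            simp only [hhit]
            rw [if_neg (show ¬((i:Int) = -1) by omega)]
            simp only [Int.toNat_natCast]
            conv_rhs => rw [pvAI_eq, dif_pos hil, if_pos hbr]
            norm_num
          · rw [show pvB_step (1, pvSeg cs a i, d, es) cs[i] = (1, pvSeg cs a i ++ [cs[i]], d, es) by
              simp [pvB_step, hbr]]
            rw [pv_seg_extend cs a i (by omega) hil]
            apply ih1 a d es (by omega) hat
            intro m h1 h2
            by_cases hmi : m < i
            · exact hm m h1 hmi
            · have : m = i := by omega
              subst this
              rw [List.getElem?_eq_getElem hil]
              simp [hbr]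
        · -- state IN_ENTRY
          intro a depth es ha hd
          rw [hdrop, List.foldl_cons]
          by_cases hc1 : cs[i] = '{'
          · rw [show pvB_step (2, pvSeg cs a i, depth, es) cs[i]
                = (2, pvSeg cs a i ++ [cs[i]], depth + 1, es) by simp [pvB_step, hc1]]
            rw [pv_seg_extend cs a i (by omega) hil]
            rw [ih2 a (depth + 1) es (by omega) (by omega)]
            conv_rhs => rw [pvAI_eq, dif_pos hil, if_pos hc1]
          · by_cases hc2 : cs[i] = '}'
            · by_cases hd0 : depth - 1 = 0
              · rw [show pvB_step (2, pvSeg cs a i, depth, es) cs[i]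
                    = (0, pvSeg cs a i ++ [cs[i]], depth - 1,
                        if PySem.Chars.strip (pvSeg cs a i ++ [cs[i]]) ≠ [] then
                          es ++ [PySem.Chars.strip (pvSeg cs a i ++ [cs[i]])] else es) by
                  simp [pvB_step, hc2, hd0]]
                rw [pv_seg_extend cs a i (by omega) hil]
                rw [ih0 (i+1) (pvSeg cs a (i+1)) (depth - 1) _ (by omega) (by omega)]
                conv_rhs => rw [pvAI_eq, dif_pos hil, if_neg hc1, if_pos hc2, if_pos hd0]
                have hsl : PySem.List.slice cs (some (a : Int)) (some ((i : Int) + 1))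
                    = pvSeg cs a (i+1) := by
                  rw [show ((i : Int) + 1) = (((i + 1 : Nat)) : Int) by push_cast; ring]
                  rw [PySem.List.slice_natCast]
                  rfl
                rw [hsl]
              · rw [show pvB_step (2, pvSeg cs a i, depth, es) cs[i]
                    = (2, pvSeg cs a i ++ [cs[i]], depth - 1, es) by simp [pvB_step, hc2, hd0]]
                rw [pv_seg_extend cs a i (by omega) hil]
                rw [ih2 a (depth - 1) es (by omega) (by omega)]
                conv_rhs => rw [pvAI_eq, dif_pos hil, if_neg hc1, if_pos hc2, if_neg hd0]
            · rw [show pvB_step (2, pvSeg cs a i, depth, es) cs[i]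
                  = (2, pvSeg cs a i ++ [cs[i]], depth, es) by simp [pvB_step, hc1, hc2]]
              rw [pv_seg_extend cs a i (by omega) hil]
              rw [ih2 a depth es (by omega) hd]
              conv_rhs => rw [pvAI_eq, dif_pos hil, if_neg hc1, if_neg hc2]
      · have hieq : i = cs.length := by omega
        subst hieq
        exact pv_atEnd cs

-- ===== VERDICT (by name: the statement is the Claim_ definition above) =====
theorem split_bib_entries_spec : Claim_equal_split_bib_entries := by
  intro text _
  unfold Spec_split_bib_entries split_bib_entries split_bib_entries_alt
  have h := (pv_main text.toList (text.toList.length) 0 (by omega) (by omega)).1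
    0 [] 0 [] (by omega) (by omega)
  simp only [List.drop_zero] at h
  rw [show pvA_outerF text.toList (text.toList.length + 1) 0 [] = pvAO text.toList 0 [] by
    unfold pvAO
    rw [Nat.sub_zero]]
  rw [h]
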